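-- pv_equiv track=rewrite | github.com/amiteshsinghcore/email-rag-bot | email-rag-4/backend/app/services/search_service.py | _generate_snippet
-- ===== SOURCE A (Python) =====
-- def _generate_snippet(text: str | None, query: str | None) -> str | None:
--     """Generate a text snippet with search terms highlighted."""
--     if not text:
--         return None
--
--     text = text[:1000]  # Limit text length
--
--     if not query:
--         return text[:200]
--
--     # Find the first occurrence of any query term
--     query_terms = query.lower().split()
--     text_lower = text.lower()
--
--     best_pos = len(text)
--     for term in query_terms:
--         pos = text_lower.find(term)
--         if pos != -1 and pos < best_pos:
--             best_pos = pos
--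
--     # Extract snippet around the best match
--     if best_pos < len(text):
--         start = max(0, best_pos - 50)
--         end = min(len(text), best_pos + 150)
--         snippet = text[start:end]
--
--         if start > 0:
--             snippet = "..." + snippet
--         if end < len(text):
--             snippet = snippet + "..."
--
--         return snippet
--
--     return text[:200]
-- ===== SOURCE B (Python) =====
-- def _generate_snippet(text, query):
--     """Snippet around the first query-term hit: one left-to-right scan of the
--     text checking every term at each position, instead of one full find() per term."""
--     if not text:
--         return None
--     text = text[:1000]
--     if not query:
--         return text[:200]
--     terms = query.lower().split()
--     low = text.lower()
--     for i in range(len(text)):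
--         if any(low.startswith(t, i) for t in terms):
--             head = "..." if i > 50 else ""
--             tail = "..." if i + 150 < len(text) else ""
--             return head + text[max(i - 50, 0):i + 150] + tail
--     return text[:200]
-- ===== Notes on version B (the rewrite author's own statement) =====
-- stated objective: alternative
-- what changed: Replaces the per-term best_pos loop (one full find() per term) with a single left-to-right scan of the text that checks every term at each position via startswith and returns at the first hit, letting slice clamping replace the explicit min() for the window end.
import Mathlib
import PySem

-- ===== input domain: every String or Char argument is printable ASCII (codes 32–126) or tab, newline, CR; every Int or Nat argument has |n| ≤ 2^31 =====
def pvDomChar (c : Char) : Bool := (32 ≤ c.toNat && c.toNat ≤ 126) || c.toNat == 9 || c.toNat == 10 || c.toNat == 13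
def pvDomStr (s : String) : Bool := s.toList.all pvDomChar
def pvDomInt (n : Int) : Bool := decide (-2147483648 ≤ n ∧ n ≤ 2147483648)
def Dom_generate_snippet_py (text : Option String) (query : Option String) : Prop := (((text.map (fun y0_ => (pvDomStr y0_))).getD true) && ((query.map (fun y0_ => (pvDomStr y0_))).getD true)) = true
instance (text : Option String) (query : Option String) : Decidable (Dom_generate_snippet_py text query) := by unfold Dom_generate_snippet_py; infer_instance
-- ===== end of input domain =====

-- B replaces A's per-term find() loop by a single left-to-right scan of the text that stops at the first position where any term matches (objective: alternative).


-- ===== PORT A =====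
-- Port of A: per-term loop over query terms, tracking best_pos via text_lower.find(term).
def generate_snippet_py (text : Option String) (query : Option String) : Option String :=
  match text with
  | none => none
  | some t =>
    if t.toList = [] then none
    else
      let tx := PySem.List.slice t.toList none (some 1000)
      match query with
      | none => some (String.ofList (PySem.List.slice tx none (some 200)))
      | some q =>
        if q.toList = [] then some (String.ofList (PySem.List.slice tx none (some 200)))
        else
          let query_terms := PySem.Chars.split₀ (PySem.Chars.lower q.toList)
          let text_lower := PySem.Chars.lower tx
          let best_pos := query_terms.foldl (fun best term =>
            let pos := PySem.Chars.find text_lower term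
            if pos ≠ -1 ∧ pos < best then pos else best) (PySem.List.len tx)
          if best_pos < PySem.List.len tx then
            let start := max 0 (best_pos - 50)
            let stop := min (PySem.List.len tx) (best_pos + 150)
            let snippet := PySem.List.slice tx (some start) (some stop)
            let snippet := if start > 0 then "...".toList ++ snippet else snippet
            let snippet := if stop < PySem.List.len tx then snippet ++ "...".toList else snippet
            some (String.ofList snippet)
          else some (String.ofList (PySem.List.slice tx none (some 200)))

-- ===== PORT B =====
-- Port of B: one scan over positions 0..len-1 (a find? over range, the early-return for loop);
-- Python's low.startswith(tm, i) is ported as startswith on the dropped suffix (exact for 0 ≤ i ≤ len).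
def generate_snippet_py_alt (text : Option String) (query : Option String) : Option String :=
  match text with
  | none => none
  | some t =>
    if t.toList = [] then none
    else
      let tx := t.toList.take 1000
      match query with
      | none => some (String.ofList (tx.take 200))
      | some q =>
        if q.toList = [] then some (String.ofList (tx.take 200))
        else
          let terms := PySem.Chars.split₀ (PySem.Chars.lower q.toList)
          let low := PySem.Chars.lower tx
          match (List.range tx.length).find?
              (fun i => terms.any (fun tm => PySem.Chars.startswith (low.drop i) tm)) with
          | some i =>
            let head := if 50 < i then "...".toList else ([] : List Char)
            let tail := if i + 150 < tx.length then "...".toList else ([] : List Char)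
            some (String.ofList (head ++ PySem.List.slice tx (some (max ((i:Int) - 50) 0)) (some ((i:Int) + 150)) ++ tail))
          | none => some (String.ofList (tx.take 200))

-- ===== PRECONDITION & SPEC =====
def Spec_generate_snippet_py (text : Option String) (query : Option String) (out : Option String) : Prop := out = generate_snippet_py_alt text query
instance (text : Option String) (query : Option String) (out : Option String) : Decidable (Spec_generate_snippet_py text query out) := by unfold Spec_generate_snippet_py; infer_instance

-- ===== CLAIM (what is proved, stated in full; the proofs are below) =====
def Claim_equal_generate_snippet_py : Prop := ∀ (text : Option String) (query : Option String), Dom_generate_snippet_py text query → Spec_generate_snippet_py text query (generate_snippet_py text query)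

-- ===== LEMMAS AND PROOFS =====

-- A's fold never exceeds its initial accumulator.
lemma pv_fold_le (low : List Char) (l : List (List Char)) (init : Int) :
    List.foldl (fun best term =>
      if PySem.Chars.find low term ≠ -1 ∧ PySem.Chars.find low term < best
      then PySem.Chars.find low term else best) init l ≤ init := by
  induction l generalizing init with
  | nil => simp
  | cons a l ih =>
    simp only [List.foldl_cons]
    refine le_trans (ih _) ?_
    split_ifs with h
    · exact le_of_lt h.2
    · exact le_rfl

-- A's fold is ≤ the find-position of any term that occurs.
lemma pv_fold_le_find (low : List Char) (l : List (List Char)) (init : Int) (tm : List Char)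
    (htm : tm ∈ l) (hne : PySem.Chars.find low tm ≠ -1) :
    List.foldl (fun best term =>
      if PySem.Chars.find low term ≠ -1 ∧ PySem.Chars.find low term < best
      then PySem.Chars.find low term else best) init l ≤ PySem.Chars.find low tm := by
  induction l generalizing init with
  | nil => cases htm
  | cons a l ih =>
    simp only [List.foldl_cons]
    rcases List.mem_cons.mp htm with rfl | h
    · refine le_trans (pv_fold_le low l _) ?_
      split_ifs with h
      · exact le_rfl
      · rw [Classical.not_and_iff_not_or_not] at h
        rcases h with h | h
        · exact absurd hne (by simpa using h)
        · omega
    · exact ih _ h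

-- A's fold stays ≥ j whenever every occurring term occurs at position ≥ j.
lemma pv_fold_ge (low : List Char) (l : List (List Char)) (j init : Int)
    (hinit : j ≤ init)
    (hall : ∀ tm ∈ l, PySem.Chars.find low tm = -1 ∨ j ≤ PySem.Chars.find low tm) :
    j ≤ List.foldl (fun best term =>
      if PySem.Chars.find low term ≠ -1 ∧ PySem.Chars.find low term < best
      then PySem.Chars.find low term else best) init l := by
  induction l generalizing init with
  | nil => simpa
  | cons a l ih =>
    simp only [List.foldl_cons]
    refine ih _ ?_ (fun tm h => hall tm (List.mem_cons_of_mem _ h))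
    split_ifs with h
    · rcases hall a (List.mem_cons_self) with h' | h'
      · exact absurd h' h.1
      · exact h'
    · exact hinit

-- A's fold is the identity when no term occurs.
lemma pv_fold_none (low : List Char) (l : List (List Char)) (init : Int)
    (hall : ∀ tm ∈ l, PySem.Chars.find low tm = -1) :
    List.foldl (fun best term =>
      if PySem.Chars.find low term ≠ -1 ∧ PySem.Chars.find low term < best
      then PySem.Chars.find low term else best) init l = init := by
  induction l generalizing init with
  | nil => rfl
  | cons a l ih =>
    simp only [List.foldl_cons]
    have ha := hall a (List.mem_cons_self)
    rw [if_neg (by simp [ha])]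
    exact ih _ (fun tm h => hall tm (List.mem_cons_of_mem _ h))

-- find? over a range returns the least index satisfying p.
lemma pv_range_find?_some {p : Nat → Bool} {n j : Nat}
    (h : (List.range n).find? p = some j) :
    j < n ∧ p j = true ∧ ∀ k < j, ¬ p k = true := by
  rw [List.find?_eq_some_iff_append] at h
  obtain ⟨hp, as, bs, heq, hall⟩ := h
  have hlen : as.length < n := by
    have := congrArg List.length heq
    simp at this
    omega
  have hj_eq : j = as.length := by
    have h1 : (List.range n)[as.length]'(by simpa using hlen) = as.length :=
      List.getElem_range _
    rw [List.getElem_of_eq heq] at h1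
    rw [List.getElem_append_right le_rfl] at h1
    simpa using h1
  subst hj_eq
  refine ⟨hlen, hp, ?_⟩
  intro k hk hpk
  have hkn : k < n := lt_trans hk hlen
  have h1 : (List.range n)[k]'(by simpa using hkn) = k := List.getElem_range _
  rw [List.getElem_of_eq heq, List.getElem_append_left hk] at h1
  have : k ∈ as := h1 ▸ List.getElem_mem _
  have := hall k this
  simp [hpk] at this

-- a prefix of a dropped suffix is an infix
lemma pv_prefix_drop_infix {tm low : List Char} {j : Nat} (h : tm <+: low.drop j) :
    tm <:+: low := by
  obtain ⟨r, hr⟩ := h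
  exact ⟨low.take j, r, by rw [List.append_assoc, hr, List.take_append_drop]⟩

-- any infix with the text nonempty yields a scan hit (some position < n where it is a prefix of the drop)
lemma pv_infix_hit {tm low : List Char} (hn : 0 < low.length) (h : tm <:+: low) :
    ∃ i < low.length, tm <+: low.drop i := by
  obtain ⟨s, t, hst⟩ := h
  by_cases hs : s.length < low.length
  · refine ⟨s.length, hs, ?_⟩
    have : low.drop s.length = tm ++ t := by
      rw [← hst, List.append_assoc, List.drop_left]
    exact this ▸ ⟨t, rfl⟩
  · -- s fills the whole text, so tm = [] and it is a prefix at 0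
    have hlen := congrArg List.length hst
    simp at hlen
    have htm : tm = [] := by
      have : tm.length = 0 := by omega
      exact List.eq_nil_of_length_eq_zero this
    exact ⟨0, hn, by simp [htm]⟩

theorem generate_snippet_py_spec : Claim_equal_generate_snippet_py := by
  unfold Claim_equal_generate_snippet_py
  intro text query _
  unfold Spec_generate_snippet_py
  cases text with
  | none => rfl
  | some t =>
    simp only [generate_snippet_py, generate_snippet_py_alt]
    by_cases ht : t.toList = []
    · simp [ht]
    rw [if_neg ht, if_neg ht]
    have h1000 : PySem.List.slice t.toList none (some 1000) = t.toList.take 1000 := by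
      rw [PySem.List.slice_to t.toList (by norm_num)]; simp
    rw [h1000]
    set tx : List Char := t.toList.take 1000 with htx
    have h200 : PySem.List.slice tx none (some 200) = tx.take 200 := by
      rw [PySem.List.slice_to tx (by norm_num)]; simp
    have htxne : tx ≠ [] := by
      rw [htx]; simp [ht]
    have hn : 0 < tx.length := List.length_pos_iff.mpr htxne
    cases query with
    | none => dsimp only; rw [h200]
    | some q =>
      dsimp only
      by_cases hq : q.toList = []
      · rw [if_pos hq, if_pos hq, h200]
      rw [if_neg hq, if_neg hq]
      set terms := PySem.Chars.split₀ (PySem.Chars.lower q.toList) with hterms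
      set low := PySem.Chars.lower tx with hlow
      have hlowlen : low.length = tx.length := by
        rw [hlow, PySem.Chars.lower, List.length_map]
      simp only [PySem.List.len]
      rcases hfind : List.find?
          (fun i => terms.any fun tm => PySem.Chars.startswith (List.drop i low) tm)
          (List.range tx.length) with _ | j
      · -- no hit: every term's find is -1, A's fold stays at len tx
        have hnone := List.find?_eq_none.mp hfind
        have hallneg : ∀ tm ∈ terms, PySem.Chars.find low tm = -1 := by
          intro tm htm
          by_contra hne
          have hinf := (PySem.Chars.find_ne_neg_one_iff low tm).mp hne
          obtain ⟨i, hi, hpre⟩ := pv_infix_hit (hlowlen ▸ hn) hinf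
          have hni := hnone i (List.mem_range.mpr (hlowlen ▸ hi))
          exact hni (List.any_eq_true.mpr ⟨tm, htm, (PySem.Chars.startswith_iff _ _).mpr hpre⟩)
        rw [pv_fold_none low terms _ hallneg]
        rw [if_neg (by omega)]
        dsimp only
        rw [h200]
      · -- hit at the least position j
        obtain ⟨hjn, hpj, hmin⟩ := pv_range_find?_some hfind
        obtain ⟨tm₀, htm₀, hsw₀⟩ := List.any_eq_true.mp hpj
        have hpre₀ : tm₀ <+: low.drop j := (PySem.Chars.startswith_iff _ _).mp hsw₀
        -- every occurring term occurs at position ≥ j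
        have hge : ∀ tm ∈ terms, PySem.Chars.find low tm = -1 ∨ (j : Int) ≤ PySem.Chars.find low tm := by
          intro tm htm
          by_cases hne : PySem.Chars.find low tm = -1
          · exact Or.inl hne
          right
          have h0 : 0 ≤ PySem.Chars.find low tm := by
            have := PySem.Chars.neg_one_le_find low tm
            omega
          obtain ⟨hoc, _⟩ := PySem.Chars.find_spec h0
          by_contra hlt
          have hjlt : (PySem.Chars.find low tm).toNat < j := by omega
          exact hmin _ hjlt (by
            simp only [List.any_eq_true]
            exact ⟨tm, htm, (PySem.Chars.startswith_iff _ _).mpr hoc⟩)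
        -- tm₀'s find is exactly j
        have hne₀ : PySem.Chars.find low tm₀ ≠ -1 :=
          (PySem.Chars.find_ne_neg_one_iff low tm₀).mpr (pv_prefix_drop_infix hpre₀)
        have h0₀ : 0 ≤ PySem.Chars.find low tm₀ := by
          have := PySem.Chars.neg_one_le_find low tm₀
          omega
        obtain ⟨_, hmin₀⟩ := PySem.Chars.find_spec h0₀
        have hle₀ : PySem.Chars.find low tm₀ ≤ (j : Int) := by
          by_contra hgt
          exact hmin₀ j (by omega) hpre₀
        have hfind₀ : PySem.Chars.find low tm₀ = (j : Int) := by
          rcases hge tm₀ htm₀ with h | h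
          · exact absurd h hne₀
          · omega
        -- A's fold equals j
        have hbest : (terms.foldl (fun best term =>
            if PySem.Chars.find low term ≠ -1 ∧ PySem.Chars.find low term < best
            then PySem.Chars.find low term else best) ((tx.length : Int))) = (j : Int) := by
          have hub := pv_fold_le_find low terms ((tx.length : Int)) tm₀ htm₀ hne₀
          rw [hfind₀] at hub
          have hlb := pv_fold_ge low terms (j : Int) ((tx.length : Int)) (by omega) hge
          omega
        rw [hbest]
        rw [if_pos (by exact_mod_cast hjn)]
        dsimp only
        -- window equality: A's min-clamped stop equals B's raw stop (slicing clamps)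
        have hsliceA : PySem.List.slice tx (some (max 0 ((j:Int) - 50)))
            (some (min ((tx.length : Int)) ((j:Int) + 150)))
            = PySem.List.slice tx (some (max ((j:Int) - 50) 0)) (some ((j:Int) + 150)) := by
          rw [max_comm]
          rw [PySem.List.slice_toNat tx (by omega) (by omega)]
          rw [PySem.List.slice_toNat tx (by omega) (by omega)]
          by_cases hca : ((j:Int) + 150) ≤ ((tx.length : Int))
          · rw [min_eq_right hca]
          · rw [min_eq_left (by omega)]
            rw [List.take_of_length_le (by simp only [List.length_drop]; omega)]
            rw [List.take_of_length_le (by simp only [List.length_drop]; omega)]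
        rw [hsliceA]
        have e1 : (max 0 ((j:Int) - 50) > 0) ↔ (50 < j) := by omega
        have e2 : (min ((tx.length : Int)) ((j:Int) + 150) < (tx.length : Int)) ↔ (j + 150 < tx.length) := by
          omega
        simp only [e1, e2]
        by_cases h50 : 50 < j <;> by_cases h150 : j + 150 < tx.length <;>
          simp [h50, h150]
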